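-- pv_equiv track=rewrite | github.com/cmaloney111/microbus-py | src/microbus_py/wire/subjects.py | escape_path_part
-- ===== SOURCE A (Python) =====
-- def escape_path_part(part: str) -> str:
--     """Escape a single path segment for inclusion in a NATS subject.
--
--     See module docstring for the full rule set.
--     """
--     out: list[str] = []
--     for ch in part:
--         cp = ord(ch)
--         if ch == ".":
--             out.append("_")
--         elif (
--             (0x41 <= cp <= 0x5A)  # A-Z
--             or (0x61 <= cp <= 0x7A)  # a-z
--             or (0x30 <= cp <= 0x39)  # 0-9
--             or ch == "-"
--         ):
--             out.append(ch)
--         else: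
--             out.append(f"%{cp:04x}")
--     return "".join(out)
-- ===== SOURCE B (Python) =====
-- import re
--
-- _NEEDS_ESCAPE = re.compile(r'[^A-Za-z0-9\-]')
--
--
-- def _repl(m: "re.Match[str]") -> str:
--     c = m.group(0)
--     if c == ".":
--         return "_"
--     return f"%{ord(c):04x}"
--
--
-- def escape_path_part(part: str) -> str:
--     """Escape a single path segment for inclusion in a NATS subject."""
--     return _NEEDS_ESCAPE.sub(_repl, part)
-- ===== Notes on version B (the rewrite author's own statement) =====
-- stated objective: idiomatic
-- what changed: Replaced the explicit per-character loop/branch/append with a single compiled re.sub over the character class [^A-Za-z0-9\-] and a replacement callback ('_' for '.', %04x otherwise); the scan runs in the regex engine instead of the Python loop.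
import Mathlib
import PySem

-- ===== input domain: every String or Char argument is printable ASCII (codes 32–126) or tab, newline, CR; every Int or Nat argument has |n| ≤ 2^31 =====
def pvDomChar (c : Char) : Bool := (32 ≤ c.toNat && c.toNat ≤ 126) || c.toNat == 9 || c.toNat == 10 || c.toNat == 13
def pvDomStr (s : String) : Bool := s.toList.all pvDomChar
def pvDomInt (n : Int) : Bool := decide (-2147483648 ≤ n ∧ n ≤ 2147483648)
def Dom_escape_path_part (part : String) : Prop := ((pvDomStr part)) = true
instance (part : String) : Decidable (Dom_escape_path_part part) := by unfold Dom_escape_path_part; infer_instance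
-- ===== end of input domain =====

-- B replaces A's explicit loop/branch/append with a single regex substitution (re.sub with a
-- callback) — same behaviour, more idiomatic; equivalence of the return values is proved below.

-- shared helper: the f-string "%{cp:04x}" (both Pythons use the identical format spec);
-- exact for cp ≤ 0xffff, which covers every code point of the ASCII input domain
def pvHexDigit (n : Nat) : Char := if n < 10 then Char.ofNat (48 + n) else Char.ofNat (87 + n)
def pvHex4 (n : Nat) : List Char :=
  [pvHexDigit (n / 4096 % 16), pvHexDigit (n / 256 % 16), pvHexDigit (n / 16 % 16), pvHexDigit (n % 16)]

-- ===== PORT A =====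
def escape_path_part (part : String) : String :=
  let out : List String := part.toList.foldl (fun out ch =>
    let cp := ch.toNat
    if ch = '.' then
      out ++ ["_"]
    else if (0x41 ≤ cp ∧ cp ≤ 0x5A) ∨ (0x61 ≤ cp ∧ cp ≤ 0x7A) ∨ (0x30 ≤ cp ∧ cp ≤ 0x39) ∨ ch = '-' then
      out ++ [String.ofList [ch]]
    else
      out ++ [String.ofList ('%' :: pvHex4 cp)]) []
  PySem.Str.join "" out

-- ===== PORT B =====
-- the regex character class [^A-Za-z0-9\-]
def pvNeedsEscape (c : Char) : Bool :=
  !((65 ≤ c.toNat && c.toNat ≤ 90) || (97 ≤ c.toNat && c.toNat ≤ 122) ||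
    (48 ≤ c.toNat && c.toNat ≤ 57) || c == '-')

-- the replacement callback _repl
def pvRepl (c : Char) : List Char := if c = '.' then ['_'] else '%' :: pvHex4 c.toNat

-- re.sub(pattern, _repl, part) for a single-character class: each matching character is
-- replaced by the callback's output, every other character is kept
def escape_path_part_alt (part : String) : String :=
  String.ofList (part.toList.flatMap (fun c => if pvNeedsEscape c then pvRepl c else [c]))

-- ===== PRECONDITION & SPEC =====
def Spec_escape_path_part (part : String) (out : String) : Prop := out = escape_path_part_alt part
instance (part : String) (out : String) : Decidable (Spec_escape_path_part part out) := by unfold Spec_escape_path_part; infer_instance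

-- ===== CLAIM (what is proved, stated in full; the proofs are below) =====
def Claim_equal_escape_path_part : Prop := ∀ (part : String), Dom_escape_path_part part → Spec_escape_path_part part (escape_path_part part)

-- ===== LEMMAS AND PROOFS =====

theorem pvJoinNilFlatten (l : List (List Char)) :
    PySem.Chars.join [] l = l.flatten := by
  induction l with
  | nil => rfl
  | cons p rest ih =>
    cases rest with
    | nil => simp [PySem.Chars.join, List.intercalate]
    | cons q r => rw [PySem.Chars.join_cons_cons]; simp_all

theorem pvFoldlFlatten (cs : List Char) (acc : List String) :
    ((cs.foldl (fun out ch =>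
      let cp := ch.toNat
      if ch = '.' then out ++ ["_"]
      else if (0x41 ≤ cp ∧ cp ≤ 0x5A) ∨ (0x61 ≤ cp ∧ cp ≤ 0x7A) ∨ (0x30 ≤ cp ∧ cp ≤ 0x39) ∨ ch = '-' then
        out ++ [String.ofList [ch]]
      else out ++ [String.ofList ('%' :: pvHex4 cp)]) acc).map String.toList).flatten
    = (acc.map String.toList).flatten ++ cs.flatMap (fun c => if pvNeedsEscape c then pvRepl c else [c]) := by
  induction cs generalizing acc with
  | nil => simp
  | cons ch rest ih =>
    simp only [List.foldl_cons, List.flatMap_cons, ih]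
    by_cases hdot : ch = '.'
    · subst hdot
      simp [pvNeedsEscape, pvRepl, List.map_append, List.flatten_append]
    · by_cases hok : (0x41 ≤ ch.toNat ∧ ch.toNat ≤ 0x5A) ∨ (0x61 ≤ ch.toNat ∧ ch.toNat ≤ 0x7A) ∨
          (0x30 ≤ ch.toNat ∧ ch.toNat ≤ 0x39) ∨ ch = '-'
      · have hne : pvNeedsEscape ch = false := by
          simp only [pvNeedsEscape, Bool.not_eq_false', Bool.or_eq_true, Bool.and_eq_true,
            decide_eq_true_eq, beq_iff_eq]
          rcases hok with h | h | h | h <;> simp_all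
        simp [hdot, hok, hne, List.map_append, List.flatten_append]
      · have hne : pvNeedsEscape ch = true := by
          simp only [pvNeedsEscape, Bool.not_eq_true', Bool.or_eq_false_iff, Bool.and_eq_false_iff,
            decide_eq_false_iff_not, beq_eq_false_iff_ne]
          push Not at hok
          obtain ⟨a, b, c, d⟩ := hok
          refine ⟨⟨⟨by omega, by omega⟩, by omega⟩, ?_⟩
          simpa using d
        simp [hdot, hok, hne, pvRepl, List.map_append, List.flatten_append]

-- ===== VERDICT (by name: the statement is the Claim_ definition above) =====
theorem escape_path_part_spec : Claim_equal_escape_path_part := by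
  intro part _
  unfold Spec_escape_path_part escape_path_part escape_path_part_alt
  apply String.toList_inj.mp
  simp only [PySem.Str.join, String.toList_ofList]
  rw [show ("" : String).toList = [] from rfl, pvJoinNilFlatten, pvFoldlFlatten]
  simp
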